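-- pv_equiv track=rewrite | github.com/nikolas-trey/Archaeon | archaeon/bridge.py | _normalize_channel
-- ===== SOURCE A (Python) =====
-- from typing import Dict, List, Optional
--
-- def _normalize_channel(raw: Optional[str]) -> Optional[str]:
--     if not raw: return None
--     s = raw.strip()
--     i = 0
--     while i < len(s) and s[i] in "#:": i += 1
--     name = s[i:]
--     for sep in (" ", "\t", "|", ":"):
--         pos = name.find(sep)
--         if pos != -1: name = name[:pos]
--     return ("#" + name) if name else None
-- ===== SOURCE B (Python) =====
-- from typing import Optional
--
-- def _normalize_channel(raw: Optional[str]) -> Optional[str]: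
--     if not raw:
--         return None
--     core = raw.strip().lstrip("#:")
--     name = ""
--     for ch in core:
--         if ch in " \t|:":
--             break
--         name += ch
--     return ("#" + name) if name else None
-- ===== Notes on version B (the rewrite author's own statement) =====
-- stated objective: simpler
-- what changed: B replaces A's manual index loop over the leading prefix characters and four sequential find/truncate passes with a chars-argument lstrip followed by a single forward scan that stops at the first separator
import Mathlib
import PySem

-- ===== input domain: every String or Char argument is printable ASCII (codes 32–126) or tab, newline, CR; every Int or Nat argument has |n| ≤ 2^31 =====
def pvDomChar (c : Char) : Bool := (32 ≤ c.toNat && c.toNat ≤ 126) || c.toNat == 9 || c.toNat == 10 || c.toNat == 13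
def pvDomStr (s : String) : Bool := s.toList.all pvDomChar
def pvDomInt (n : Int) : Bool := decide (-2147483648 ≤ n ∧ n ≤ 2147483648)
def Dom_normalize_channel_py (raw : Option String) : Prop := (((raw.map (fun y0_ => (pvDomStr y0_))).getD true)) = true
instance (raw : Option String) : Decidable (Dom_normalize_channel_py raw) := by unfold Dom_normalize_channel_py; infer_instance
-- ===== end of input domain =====

-- B replaces A's leading-char index loop and four sequential find/truncate passes
-- with lstrip('#:') plus a single forward scan stopping at the first separator (objective: simpler).

-- ===== PORT A =====
-- while i < len(s) and s[i] in "#:": i += 1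
def pvSkipA (l : List Char) (i : Nat) : Nat :=
  if h : i < l.length then
    if PySem.Chars.isIn [l[i]] "#:".toList then pvSkipA l (i + 1) else i
  else i
termination_by l.length - i

-- one pass of the for-loop body: pos = name.find(sep); if pos != -1: name = name[:pos]
def pvCutA (name : List Char) (sep : List Char) : List Char :=
  let pos := PySem.Chars.find name sep
  if pos ≠ -1 then PySem.List.slice name none (some pos) else name

def normalize_channel_py (raw : Option String) : Option String :=
  match raw with
  | none => none
  | some r =>
    if r = "" then none
    else
      let s := PySem.Chars.strip r.toList
      let i := pvSkipA s 0
      let name := PySem.List.slice s (some (i : Int)) none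
      let name := [" ".toList, "\t".toList, "|".toList, ":".toList].foldl pvCutA name
      if name ≠ [] then some (String.ofList ('#' :: name)) else none

-- ===== PORT B =====
-- for ch in core: if ch in " \t|:": break; name += ch
def pvScanB (acc : List Char) (cs : List Char) : List Char :=
  match cs with
  | [] => acc
  | c :: rest => if c ∈ " \t|:".toList then acc else pvScanB (acc ++ [c]) rest

def normalize_channel_py_alt (raw : Option String) : Option String :=
  match raw with
  | none => none
  | some r =>
    if r = "" then none
    else
      -- raw.strip().lstrip("#:"): lstrip with a char set drops exactly the leading chars of that set
      let core := (PySem.Chars.strip r.toList).dropWhile (fun c => c == '#' || c == ':')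
      let name := pvScanB [] core
      if name ≠ [] then some (String.ofList ('#' :: name)) else none

-- ===== PRECONDITION & SPEC =====
def Spec_normalize_channel_py (raw : Option String) (out : Option String) : Prop := out = normalize_channel_py_alt raw
instance (raw : Option String) (out : Option String) : Decidable (Spec_normalize_channel_py raw out) := by unfold Spec_normalize_channel_py; infer_instance

-- ===== CLAIM (what is proved, stated in full; the proofs are below) =====
def Claim_equal_normalize_channel_py : Prop := ∀ (raw : Option String), Dom_normalize_channel_py raw → Spec_normalize_channel_py raw (normalize_channel_py raw)

-- ===== LEMMAS AND PROOFS =====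

-- singleton-string membership: c in "#:" ↔ c = '#' ∨ c = ':'
theorem pv_isIn_singleton (c : Char) (l : List Char) :
    PySem.Chars.isIn [c] l = l.contains c := by
  by_cases hc : c ∈ l
  · rw [List.contains_eq_mem, decide_eq_true hc]
    rw [PySem.Chars.isIn_iff_infix]
    obtain ⟨s, t, rfl⟩ := List.append_of_mem hc
    exact ⟨s, t, by simp⟩
  · rw [List.contains_eq_mem, decide_eq_false hc, Bool.eq_false_iff]
    intro hin
    rw [PySem.Chars.isIn_iff_infix] at hin
    exact hc (List.singleton_sublist.mp hin.sublist)

-- A's skip loop: dropping the skipped prefix is dropWhile over the '#'/':' set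
theorem pvSkipA_drop (l : List Char) (i : Nat) :
    l.drop (pvSkipA l i) = (l.drop i).dropWhile (fun c => c == '#' || c == ':') := by
  rw [pvSkipA]
  by_cases h : i < l.length
  · simp only [h, dif_pos]
    have hdrop : l.drop i = l[i] :: l.drop (i + 1) := List.drop_eq_getElem_cons h
    by_cases hc : PySem.Chars.isIn [l[i]] "#:".toList = true
    · rw [if_pos hc, pvSkipA_drop l (i + 1), hdrop, List.dropWhile_cons]
      have : (l[i] == '#' || l[i] == ':') = true := by
        have := hc
        rw [pv_isIn_singleton] at this
        simpa using this
      simp [this]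
    · rw [if_neg hc, hdrop, List.dropWhile_cons]
      have : (l[i] == '#' || l[i] == ':') = false := by
        have := hc
        rw [pv_isIn_singleton] at this
        simpa using Bool.eq_false_iff.mpr this
      simp [this]
  · simp only [h, dif_neg, not_false_iff]
    simp [List.drop_eq_nil_of_le (by omega : l.length ≤ i)]
termination_by l.length - i

-- take at the first occurrence of c is takeWhile (· ≠ c)
theorem pv_take_first (name : List Char) (c : Char) (k : Nat)
    (hk : k < name.length) (hc : name[k] = c) (hlt : ∀ i (h : i < k), name[i]'(by omega) ≠ c) :
    name.take k = name.takeWhile (fun x => x != c) := by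
  induction name generalizing k with
  | nil => simp at hk
  | cons a as ih =>
    cases k with
    | zero =>
      simp at hc
      subst hc
      simp
    | succ k =>
      have ha : a ≠ c := by
        have := hlt 0 (by omega)
        simpa using this
      rw [List.take_succ_cons, List.takeWhile_cons]
      simp only [bne_iff_ne, ne_eq, ha, not_false_iff, if_pos]
      rw [ih k (by simpa using hk) (by simpa using hc)
        (fun i h => by have := hlt (i + 1) (by omega); simpa using this)]

-- one find/truncate pass at a single-char separator is takeWhile (· ≠ c)
theorem pvCutA_char (name : List Char) (c : Char) :
    pvCutA name [c] = name.takeWhile (fun x => x != c) := by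
  unfold pvCutA
  by_cases h : PySem.Chars.find name [c] = -1
  · rw [if_neg (by simpa using h)]
    rw [PySem.Chars.find_eq_neg_one_iff] at h
    have hnotmem : c ∉ name := by
      intro hc
      obtain ⟨s, t, rfl⟩ := List.append_of_mem hc
      exact h ⟨s, t, by simp⟩
    exact (List.takeWhile_eq_self_iff.mpr (fun x hx => by
      simp only [bne_iff_ne, ne_eq]
      rintro rfl; exact hnotmem hx)).symm
  · rw [if_pos (by simpa using h)]
    have hpos : 0 ≤ PySem.Chars.find name [c] := by
      have := PySem.Chars.neg_one_le_find name [c]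
      omega
    obtain ⟨hpre, hfirst⟩ := PySem.Chars.find_spec hpos
    set k := (PySem.Chars.find name [c]).toNat with hkdef
    have hk : k < name.length := by
      rcases hpre with ⟨t, ht⟩
      by_contra hge
      rw [List.drop_eq_nil_of_le (by omega)] at ht
      simp at ht
    have hck : name[k] = c := by
      rcases hpre with ⟨t, ht⟩
      rw [List.drop_eq_getElem_cons hk] at ht
      simp only [List.singleton_append, List.cons.injEq] at ht
      exact ht.1.symm
    have hlt : ∀ i (h : i < k), name[i]'(by omega) ≠ c := by
      intro i hi hcontra
      apply hfirst i hi
      exact ⟨name.drop (i + 1), by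
        rw [List.singleton_append, ← hcontra]
        exact (List.drop_eq_getElem_cons (by omega)).symm⟩
    rw [PySem.List.slice_to name hpos, ← hkdef, pv_take_first name c k hk hck hlt]

-- B's scan loop is an accumulator-passing takeWhile
theorem pvScanB_eq (acc cs : List Char) :
    pvScanB acc cs = acc ++ cs.takeWhile (fun c => !(" \t|:".toList.contains c)) := by
  induction cs generalizing acc with
  | nil => simp [pvScanB]
  | cons c rest ih =>
    rw [pvScanB, List.takeWhile_cons, List.contains_eq_mem]
    by_cases h : c ∈ " \t|:".toList
    · rw [if_pos h, decide_eq_true h]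
      simp
    · rw [if_neg h, decide_eq_false h, ih]
      simp

-- the four sequential cuts equal one takeWhile over the separator set
theorem pvFold_eq (name : List Char) :
    [" ".toList, "\t".toList, "|".toList, ":".toList].foldl pvCutA name
      = name.takeWhile (fun c => !(" \t|:".toList.contains c)) := by
  simp only [List.foldl_cons, List.foldl_nil]
  have h1 : " ".toList = [' '] := by decide
  have h2 : "\t".toList = ['\t'] := by decide
  have h3 : "|".toList = ['|'] := by decide
  have h4 : ":".toList = [':'] := by decide
  rw [h1, h2, h3, h4, pvCutA_char, pvCutA_char, pvCutA_char, pvCutA_char,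
    List.takeWhile_takeWhile, List.takeWhile_takeWhile, List.takeWhile_takeWhile]
  congr 1
  funext c
  have : " \t|:".toList = [' ', '\t', '|', ':'] := by decide
  rw [this]
  by_cases hsp : c = ' ' <;> by_cases htab : c = '\t' <;> by_cases hbar : c = '|' <;>
    by_cases hcol : c = ':' <;> simp_all [List.contains_eq_mem]

-- ===== VERDICT (by name: the statement is the Claim_ definition above) =====
theorem normalize_channel_py_spec : Claim_equal_normalize_channel_py := by
  intro raw _
  unfold Spec_normalize_channel_py normalize_channel_py normalize_channel_py_alt
  cases raw with
  | none => rfl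
  | some r =>
    by_cases hr : r = ""
    · simp [hr]
    · simp only [hr, if_neg, not_false_iff]
      have hdrop := pvSkipA_drop (PySem.Chars.strip r.toList) 0
      simp only [List.drop_zero] at hdrop
      rw [PySem.List.slice_from_natCast, hdrop, pvFold_eq,
        pvScanB_eq, List.nil_append]
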